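/- GENERATED by farm/mkstatement.py from design/units.tsv (unit `stb_vorbis_get_frame_float.COMPOSITION`) and the Specs of Vorbis/Spec/*.lean — do not edit.
   THE STATEMENT of the proof unit `stb_vorbis_get_frame_float.COMPOSITION`: the function `stb_vorbis_get_frame_float` (93 instructions) satisfies its contract,
   GIVEN THE STATEMENTS OF ITS 6 SEGMENTS (`Vorbis.Spec.stb_vorbis_get_frame_float.Seg<k> Lay μ u₀`: what the unit `stb_vorbis_get_frame_float.<k>` proves).
   No machine code is walked: `ReachVia.trans` along the segments (the exit assertion of a segment is the entry assertion of
   its successor), an induction on the loop measures. What the names mean: Vorbis/Spec/Basic.lean. The theorem to prove: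
   `theorem stb_vorbis_get_frame_float_COMPOSITION_ok : Vorbis.Spec.stb_vorbis_get_frame_float_COMPOSITION.Statement`. -/
import Vorbis.Spec.GetFrameFloat
import Vorbis.Spec.Top
namespace Vorbis.Spec.stb_vorbis_get_frame_float_COMPOSITION
open X86 X86.User Asan

/-- The statement of unit `stb_vorbis_get_frame_float.COMPOSITION`. -/
def Statement : Prop :=
  ∀ (Lay : Layout) (_hLay : Lay.hi = 0x1000000) (μ : Microarch) (_hμ : UserX.MicroOK μ) (u₀ : State)
    (_h_stb_vorbis_get_frame_float_1 : Vorbis.Spec.stb_vorbis_get_frame_float.Seg1 Lay μ u₀)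
    (_h_stb_vorbis_get_frame_float_2 : Vorbis.Spec.stb_vorbis_get_frame_float.Seg2 Lay μ u₀)
    (_h_stb_vorbis_get_frame_float_3 : Vorbis.Spec.stb_vorbis_get_frame_float.Seg3 Lay μ u₀)
    (_h_stb_vorbis_get_frame_float_4 : Vorbis.Spec.stb_vorbis_get_frame_float.Seg4 Lay μ u₀)
    (_h_stb_vorbis_get_frame_float_5 : Vorbis.Spec.stb_vorbis_get_frame_float.Seg5 Lay μ u₀)
    (_h_stb_vorbis_get_frame_float_6 : Vorbis.Spec.stb_vorbis_get_frame_float.Seg6 Lay μ u₀),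
    ∀ (others : List Obj) (frames : List (Nat × FrameLayout)) (len : Nat) (A : Arena) (stored room : Int) (ysz : Nat → Nat), Calls Lay μ Vorbis.WayInv (Vorbis.conv u₀) Vorbis.L.stb_vorbis_get_frame_float.entry (Vorbis.Spec.stb_vorbis_get_frame_float.spec others frames len A stored room ysz)

end Vorbis.Spec.stb_vorbis_get_frame_float_COMPOSITION
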